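-- pv_equiv track=rewrite | github.com/NityaSG/HealthCalculators | q.py | get_longest_distance
-- ===== SOURCE A (Python) =====
-- def get_longest_distance(input1, input2):
--     target_char = input2
--     longest_distance = -1
--     prev_index = -1
--     distinct_chars = set()
--
--     for i, char in enumerate(input1):
--         if char == target_char:
--             if prev_index != -1:
--                 distance = i - prev_index - 1
--                 if distance > longest_distance:
--                     longest_distance = distance
--             prev_index = i
--             distinct_chars.clear()  # Clear distinct_chars set after each occurrence of the target character
--         elif char != ' ':
--             distinct_chars.add(char)
--
--     if prev_index == -1 or longest_distance == -1 or len(distinct_chars) < 1: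
--         return -1
--
--     distance = len(input1) - prev_index - 1
--     if distance > longest_distance:
--         longest_distance = distance
--
--     return longest_distance
-- ===== SOURCE B (Python) =====
-- def get_longest_distance(input1, input2):
--     idxs = [i for i, c in enumerate(input1) if c == input2]
--     if len(idxs) < 2:
--         return -1
--     tail = input1[idxs[-1] + 1:]
--     if all(c == ' ' for c in tail):
--         return -1
--     gaps = [b - a - 1 for a, b in zip(idxs, idxs[1:])]
--     return max(max(gaps), len(input1) - idxs[-1] - 1)
-- ===== Notes on version B (the rewrite author's own statement) =====
-- stated objective: alternative
-- what changed: A's single stateful scan carrying a running max gap, the previous occurrence index and a distinct-char set is replaced by a direct decomposition: collect the occurrence indices once, then take the max over consecutive-index gaps plus the tail gap, with the all-spaces tail check done on the slice after the last occurrence.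
import Mathlib
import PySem

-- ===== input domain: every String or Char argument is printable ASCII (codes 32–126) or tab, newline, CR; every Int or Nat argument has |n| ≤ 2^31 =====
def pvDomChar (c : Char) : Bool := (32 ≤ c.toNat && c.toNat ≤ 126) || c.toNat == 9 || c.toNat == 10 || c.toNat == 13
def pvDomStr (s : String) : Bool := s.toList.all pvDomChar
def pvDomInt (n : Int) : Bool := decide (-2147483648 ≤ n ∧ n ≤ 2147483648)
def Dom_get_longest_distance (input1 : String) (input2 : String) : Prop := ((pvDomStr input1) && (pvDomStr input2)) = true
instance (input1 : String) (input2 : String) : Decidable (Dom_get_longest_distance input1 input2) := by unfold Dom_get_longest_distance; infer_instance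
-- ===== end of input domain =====

-- B replaces A's single stateful scan (running gap / prev index / distinct-char set) by a
-- direct decomposition: collect the occurrence indices once, then take the max over
-- consecutive gaps plus the tail gap (objective: alternative decomposition, same cost).


-- ===== PORT A =====
-- A-side helper: the body of A's for-loop; state = (longest_distance, prev_index, distinct_chars).
-- 'char == target_char' (a 1-char string vs input2) is exact as code-point list equality [c] == input2.toList.
def pvStepA (t : List Char) (st : Int × Int × PySem.Set Char) (p : Int × Char) : Int × Int × PySem.Set Char :=
  if [p.2] == t then
    ((if st.2.1 ≠ -1 then (if p.1 - st.2.1 - 1 > st.1 then p.1 - st.2.1 - 1 else st.1) else st.1),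
      p.1, PySem.Set.empty)   -- distinct_chars.clear()
  else if p.2 ≠ ' ' then (st.1, st.2.1, PySem.Set.add st.2.2 p.2)
  else st

def get_longest_distance (input1 : String) (input2 : String) : Int :=
  let res := (PySem.List.enumerate input1.toList 0).foldl (pvStepA input2.toList)
    (-1, -1, PySem.Set.empty)
  if res.2.1 = -1 ∨ res.1 = -1 ∨ PySem.Set.len res.2.2 < 1 then -1
  else if PySem.Str.len input1 - res.2.1 - 1 > res.1 then PySem.Str.len input1 - res.2.1 - 1
  else res.1

-- ===== PORT B =====
def get_longest_distance_alt (input1 : String) (input2 : String) : Int :=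
  let idxs := ((PySem.List.enumerate input1.toList 0).filter (fun p => [p.2] == input2.toList)).map (fun p => p.1)
  if idxs.length < 2 then -1
  else
    let lastI := PySem.List.pyGetD idxs (-1) 0   -- idxs[-1]; the default is never read (idxs nonempty here)
    let tail := PySem.List.slice input1.toList (some (lastI + 1)) none   -- input1[idxs[-1]+1:]
    if tail.all (fun c => c == ' ') then -1
    else
      let gaps := (idxs.zip idxs.tail).map (fun p => p.2 - p.1 - 1)
      match PySem.List.max? gaps (fun x => x) with   -- max(gaps); gaps nonempty since len(idxs) ≥ 2
      | some m => max m (PySem.Str.len input1 - lastI - 1)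
      | none => -1

-- ===== PRECONDITION & SPEC =====
def Spec_get_longest_distance (input1 : String) (input2 : String) (out : Int) : Prop := out = get_longest_distance_alt input1 input2
instance (input1 : String) (input2 : String) (out : Int) : Decidable (Spec_get_longest_distance input1 input2 out) := by unfold Spec_get_longest_distance; infer_instance

-- ===== CLAIM (what is proved, stated in full; the proofs are below) =====
def Claim_equal_get_longest_distance : Prop := ∀ (input1 : String) (input2 : String), Dom_get_longest_distance input1 input2 → Spec_get_longest_distance input1 input2 (get_longest_distance input1 input2)

-- ===== LEMMAS AND PROOFS =====

-- occurrence indices of the target in cs (B's 'idxs')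
def pvOcc (t : List Char) (cs : List Char) : List Int :=
  ((PySem.List.enumerate cs 0).filter (fun p => [p.2] == t)).map (fun p => p.1)

-- the characters after the last occurrence (whole cs if none): what A's distinct_chars sees
def pvTail (t : List Char) (cs : List Char) : List Char :=
  cs.foldl (fun acc c => if [c] == t then [] else acc ++ [c]) []

-- A's longest_distance after the loop, expressed on the occurrence list
def pvG (l : List Int) : Int := ((l.zip l.tail).map (fun p => p.2 - p.1 - 1)).foldl max (-1)

lemma pvOcc_concat (t : List Char) (cs : List Char) (c : Char) :
    pvOcc t (cs ++ [c]) = pvOcc t cs ++ (if [c] == t then [((cs.length : Nat) : Int)] else []) := by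
  unfold pvOcc
  rw [PySem.List.enumerate_append, List.filter_append, List.map_append]
  congr 1
  simp only [PySem.List.enumerate]
  by_cases h : ([c] == t) = true <;> simp [h, List.filter]


lemma pvTail_concat (t : List Char) (cs : List Char) (c : Char) :
    pvTail t (cs ++ [c]) = if [c] == t then [] else pvTail t cs ++ [c] := by
  unfold pvTail
  rw [List.foldl_append]
  simp


lemma mem_pvOcc_bounds (t : List Char) (cs : List Char) {j : Int} (h : j ∈ pvOcc t cs) :
    0 ≤ j ∧ j < (cs.length : Int) := by
  unfold pvOcc at h
  simp only [List.mem_map, List.mem_filter] at h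
  obtain ⟨p, ⟨hp, _⟩, rfl⟩ := h
  rw [PySem.List.mem_enumerate_iff] at hp
  obtain ⟨k, hk, rfl⟩ := hp
  simp; omega


lemma pvOcc_pairwise (t : List Char) (cs : List Char) : (pvOcc t cs).Pairwise (· < ·) := by
  unfold pvOcc
  exact ((PySem.List.pairwise_lt_enumerate cs 0).filter _).map _ (fun _ _ h => h)


lemma zip_tail_concat {l : List Int} (n : Int) (h : l ≠ []) :
    (l ++ [n]).zip (l ++ [n]).tail = l.zip l.tail ++ [(l.getLastD 0, n)] := by
  induction l with
  | nil => simp at h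
  | cons a l ih =>
    cases l with
    | nil => simp
    | cons b l =>
      have := ih (by simp)
      simp only [List.cons_append, List.zip_cons_cons, List.tail_cons] at *
      rw [this]
      simp [List.getLastD]


lemma set_foldl_add_ne_nil {s : PySem.Set Char} (h : s ≠ []) (l : List Char) :
    l.foldl PySem.Set.add s ≠ [] := by
  induction l generalizing s with
  | nil => exact h
  | cons c l ih =>
    refine ih ?_
    unfold PySem.Set.add
    split
    · exact h
    · simp


lemma set_ofList_eq_nil_iff (l : List Char) : PySem.Set.ofList l = [] ↔ l = [] := by
  cases l with
  | nil => simp [PySem.Set.ofList_eq_foldl]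
  | cons c l =>
    rw [PySem.Set.ofList_eq_foldl]
    simp only [List.foldl_cons]
    constructor
    · intro h
      exact absurd h (set_foldl_add_ne_nil (by simp [PySem.Set.add]) l)
    · intro h; simp at h


lemma pyGetD_concat_neg_one (l : List Int) (n : Int) (d : Int) :
    PySem.List.pyGetD (l ++ [n]) (-1) d = n := by
  simp [PySem.List.pyGetD, PySem.List.pyGet?, PySem.List.pyIdx?]

lemma set_ofList_concat (l : List Char) (c : Char) :
    PySem.Set.ofList (l ++ [c]) = PySem.Set.add (PySem.Set.ofList l) c := by
  rw [PySem.Set.ofList_eq_foldl, PySem.Set.ofList_eq_foldl, List.foldl_append]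
  rfl

lemma max_eq_ite (a b : Int) : (if b > a then b else a) = max a b := by
  rw [max_def]; split_ifs <;> omega

lemma pairwise_zip_tail : ∀ {l : List Int}, l.Pairwise (· < ·) → ∀ p ∈ l.zip l.tail, p.1 < p.2
  | [], _, p, hp => by simp at hp
  | [_], _, p, hp => by simp at hp
  | a :: b :: l, h, p, hp => by
    simp only [List.tail_cons, List.zip_cons_cons, List.mem_cons] at hp
    rcases hp with rfl | hp
    · exact (List.pairwise_cons.mp h).1 b (by simp)
    · exact pairwise_zip_tail (List.pairwise_cons.mp h).2 p hp

lemma pvFold_char (t : List Char) (cs : List Char) :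
    (PySem.List.enumerate cs 0).foldl (pvStepA t) (-1, -1, PySem.Set.empty) =
      (pvG (pvOcc t cs), (pvOcc t cs).getLastD (-1),
        PySem.Set.ofList ((pvTail t cs).filter (fun c => !(c == ' ')))) := by
  induction cs using List.reverseRecOn with
  | nil =>
    simp [pvOcc, pvTail, pvG, PySem.List.enumerate, PySem.Set.ofList_eq_foldl]
  | append_singleton xs x ih =>
    rw [PySem.List.enumerate_append, List.foldl_append, ih]
    have he : PySem.List.enumerate [x] (0 + (xs.length : Int)) = [((xs.length : Int), x)] := by
      simp [PySem.List.enumerate]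
    rw [he]
    simp only [List.foldl_cons, List.foldl_nil]
    rw [pvOcc_concat, pvTail_concat]
    by_cases hc : ([x] == t) = true
    · simp only [hc, if_true]
      unfold pvStepA
      simp only [hc, if_true]
      rcases List.eq_nil_or_concat (pvOcc t xs) with h0 | ⟨l, n, hl⟩
      · rw [h0]
        simp [pvG]
      · rw [List.concat_eq_append] at hl
        rw [hl]
        have hn : 0 ≤ n := (mem_pvOcc_bounds t xs (by rw [hl]; simp)).1
        have hlast : (l ++ [n]).getLastD (-1 : Int) = n := List.getLastD_concat
        have hlast0 : (l ++ [n]).getLastD (0 : Int) = n := List.getLastD_concat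
        have hne : n ≠ -1 := by omega
        simp only [hlast, hne, ne_eq, not_false_iff, if_true, Prod.mk.injEq]
        refine ⟨?_, (List.getLastD_concat).symm, by simp [PySem.Set.ofList_eq_foldl]⟩
        unfold pvG
        rw [zip_tail_concat (l := l ++ [n]) ((xs.length : Int)) (by simp), hlast0,
          List.map_append, List.foldl_append]
        simp only [List.map_cons, List.map_nil, List.foldl_cons, List.foldl_nil]
        rw [max_eq_ite]
    · have hc' : ([x] == t) = false := by simpa using hc
      simp only [hc', Bool.false_eq_true, if_false, List.append_nil]
      unfold pvStepA
      simp only [hc', Bool.false_eq_true, if_false]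
      by_cases hsp : x = ' '
      · simp [hsp, List.filter_append]
      · simp only [hsp, ne_eq, not_false_iff, if_true, List.filter_append]
        have hspb : (x == ' ') = false := by simpa using hsp
        have hfx : List.filter (fun c => !(c == ' ')) [x] = [x] := by simp [List.filter, hspb]
        rw [hfx, set_ofList_concat]


lemma pvTail_spec (t : List Char) (cs : List Char) :
    (pvOcc t cs = [] ∧ pvTail t cs = cs) ∨
      (∃ l n, pvOcc t cs = l ++ [n] ∧ 0 ≤ n ∧ n.toNat + 1 ≤ cs.length ∧
        pvTail t cs = cs.drop (n.toNat + 1)) := by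
  induction cs using List.reverseRecOn with
  | nil => exact Or.inl ⟨by simp [pvOcc, PySem.List.enumerate], rfl⟩
  | append_singleton xs x ih =>
    rw [pvOcc_concat, pvTail_concat]
    by_cases hc : ([x] == t) = true
    · refine Or.inr ⟨pvOcc t xs, (xs.length : Int), by simp [hc], by positivity, by simp, ?_⟩
      simp [hc]
    · have hc' : ([x] == t) = false := by simpa using hc
      simp only [hc', Bool.false_eq_true, if_false, List.append_nil]
      rcases ih with ⟨h0, ht⟩ | ⟨l, n, hl, hn0, hlen, ht⟩
      · exact Or.inl ⟨h0, by rw [ht]⟩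
      · refine Or.inr ⟨l, n, hl, hn0, by simp; omega, ?_⟩
        rw [ht, List.drop_append_of_le_length hlen]


-- ===== VERDICT (by name: the statement is the Claim_ definition above) =====
theorem get_longest_distance_spec : Claim_equal_get_longest_distance := by
  intro input1 input2 _
  unfold Spec_get_longest_distance
  simp only [get_longest_distance, get_longest_distance_alt, pvFold_char, PySem.Str.len_eq]
  have hocc : ((PySem.List.enumerate input1.toList 0).filter
      (fun p => [p.2] == input2.toList)).map (fun p => p.1) = pvOcc input2.toList input1.toList := rfl
  rw [hocc]
  set t := input2.toList with ht
  set cs := input1.toList with hcs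
  rcases pvTail_spec t cs with ⟨h0, htail⟩ | ⟨l, n, hl, hn0, hlen, htail⟩
  · rw [h0]; simp
  · have hnmem : n ∈ pvOcc t cs := by rw [hl]; simp
    have hnlt : n < (cs.length : Int) := (mem_pvOcc_bounds t cs hnmem).2
    have hpw : (pvOcc t cs).Pairwise (· < ·) := pvOcc_pairwise t cs
    have hlast : (pvOcc t cs).getLastD (-1) = n := by rw [hl]; exact List.getLastD_concat
    have hget : PySem.List.pyGetD (pvOcc t cs) (-1) 0 = n := by
      rw [hl]; exact pyGetD_concat_neg_one l n 0
    have hslice : PySem.List.slice cs (some (n + 1)) none = pvTail t cs := by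
      rw [PySem.List.slice_from cs (by omega : (0:Int) ≤ n + 1), htail]
      congr 1; omega
    rw [hget, hslice, hlast]
    rcases List.eq_nil_or_concat l with h1 | ⟨l', m, hl'⟩
    · -- exactly one occurrence: both return -1
      rw [h1] at hl
      rw [hl]
      simp [pvG]
    · rw [List.concat_eq_append] at hl'
      rw [hl'] at hl
      rw [hl] at hpw ⊢
      -- the occurrence list has ≥ 2 elements
      have hlen2 : ¬ ((l' ++ [m] ++ [n]).length < 2) := by simp
      have hzip : (l' ++ [m] ++ [n]).zip (l' ++ [m] ++ [n]).tail =
          (l' ++ [m]).zip (l' ++ [m]).tail ++ [((l' ++ [m]).getLastD 0, n)] :=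
        zip_tail_concat (l := l' ++ [m]) n (by simp)
      have hm0 : (l' ++ [m]).getLastD (0:Int) = m := List.getLastD_concat
      have hgapsnn : ∀ y ∈ (((l' ++ [m] ++ [n]).zip (l' ++ [m] ++ [n]).tail).map
          (fun p => p.2 - p.1 - 1)), 0 ≤ y := by
        intro y hy
        obtain ⟨p, hp, rfl⟩ := List.mem_map.mp hy
        have := pairwise_zip_tail hpw p hp
        omega
      -- A's longest_distance is ≥ 0 here
      have hGnn : 0 ≤ pvG (l' ++ [m] ++ [n]) := by
        unfold pvG
        have hmem : ((m:Int), n) ∈ (l' ++ [m] ++ [n]).zip (l' ++ [m] ++ [n]).tail := by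
          rw [hzip, hm0]; simp
        have hmn : m < n := pairwise_zip_tail hpw _ hmem
        have hmm : (n - m - 1) ∈ (((l' ++ [m] ++ [n]).zip (l' ++ [m] ++ [n]).tail).map
            (fun p => p.2 - p.1 - 1)) := List.mem_map.mpr ⟨(m, n), hmem, rfl⟩
        have := (PySem.List.le_foldl_max (((l' ++ [m] ++ [n]).zip (l' ++ [m] ++ [n]).tail).map
            (fun p => p.2 - p.1 - 1)) (-1)).2 _ hmm
        omega
      have hGne : ¬ (pvG (l' ++ [m] ++ [n]) = -1) := by omega
      have hnne : ¬ (n = -1) := by omega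
      simp only [hlen2, if_false, hGne, hnne, false_or]
      by_cases hall : ((pvTail t cs).all (fun c => c == ' ')) = true
      · -- tail after the last occurrence is all spaces: both -1
        have hfilter : (pvTail t cs).filter (fun c => !(c == ' ')) = [] := by
          rw [List.filter_eq_nil_iff]
          intro a ha
          have := List.all_eq_true.mp hall a ha
          simp [this]
        rw [hfilter, hall]
        simp [PySem.Set.ofList_eq_foldl, PySem.Set.len]
      · have hfilter : ¬ ((pvTail t cs).filter (fun c => !(c == ' ')) = []) := by
          rw [List.filter_eq_nil_iff]
          intro hcon
          refine hall (List.all_eq_true.mpr ?_)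
          intro a ha
          have := hcon a ha
          simpa using this
        have hlen1 : ¬ (PySem.Set.len (PySem.Set.ofList
            ((pvTail t cs).filter (fun c => !(c == ' ')))) < 1) := by
          have hne := (not_iff_not.mpr (set_ofList_eq_nil_iff _)).mpr hfilter
          have : PySem.Set.ofList ((pvTail t cs).filter (fun c => !(c == ' '))) ≠ [] := hne
          unfold PySem.Set.len
          cases hx : PySem.Set.ofList ((pvTail t cs).filter (fun c => !(c == ' '))) with
          | nil => exact absurd hx this
          | cons a as => simp
        rw [if_neg hall, if_neg hlen1]
        -- both sides compute max(longest inner gap, tail gap)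
        cases hgg : ((l' ++ [m] ++ [n]).zip (l' ++ [m] ++ [n]).tail).map
            (fun p => p.2 - p.1 - 1) with
        | nil => rw [hzip] at hgg; simp at hgg
        | cons g gs =>
          have hg0 : 0 ≤ g := hgapsnn g (by rw [hgg]; simp)
          have hpvg : pvG (l' ++ [m] ++ [n]) = gs.foldl max g := by
            unfold pvG
            rw [hgg]
            simp only [List.foldl_cons]
            congr 1
            omega
          rw [hpvg, max_eq_ite, PySem.List.max?_id_cons]
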